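-- pv_equiv track=rewrite | github.com/isak148/Bachelor_HVL | VL6180X/examples/bachelor_pustesenor.py | kalkuler_pustefrekvens
-- ===== SOURCE A (Python) =====
-- def kalkuler_pustefrekvens(data):
--     '''
--     Denne funksjonen teller bytter mellom + og - av den deriverte mellom hver tidsenhet av en liste med 160 verdier.
--     Dette tilsvarer 8 sekunder med en sampling på 20hz, når det er telt enten 5 positive eller 5 negative verdier blir
--     en teller oppdatert med +1. Det betyr at refleksjonflaten må holde samme retning i 250 ms sammenhengende.
--     Dette fjerner sannsynlighten for og telle "feil ved støy. Resultatet blir brukt til og beregne pustefrekvens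
--     '''
--     count = 0
--     current_sign = None
--     streak = 0
--     ready_for_switch = False
--
--     for value in data:
--         # Nullverdier hopper vi over uten å påvirke streaken
--         if value == 0:
--             continue
--
--         sign = 1 if value > 0 else -1
--
--         if sign == current_sign:
--             streak += 1
--         else:
--             if streak >= 5:
--                 ready_for_switch = True
--             else:
--                 ready_for_switch = False
--
--             if ready_for_switch and sign != current_sign:
--                 count += 1
--                 ready_for_switch = False
--                 streak = 1  # start ny streak
--             else:
--                 streak = 1
--
--         current_sign = sign
--
--     return count
-- ===== SOURCE B (Python) =====
-- def kalkuler_pustefrekvens(data):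
--     s = [1 if v > 0 else -1 for v in data if v != 0]
--     return sum(a == b == c == d == e != f
--                for a, b, c, d, e, f in zip(s, s[1:], s[2:], s[3:], s[4:], s[5:]))
-- ===== Notes on version B (the rewrite author's own statement) =====
-- stated objective: alternative
-- what changed: Replaces A's stateful streak machine (current_sign/streak/ready_for_switch updated per element) by a stateless sliding-window pattern count: map to signs, then count 6-element windows (via zip of shifted lists) whose first five signs are equal and differ from the sixth.
import Mathlib
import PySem

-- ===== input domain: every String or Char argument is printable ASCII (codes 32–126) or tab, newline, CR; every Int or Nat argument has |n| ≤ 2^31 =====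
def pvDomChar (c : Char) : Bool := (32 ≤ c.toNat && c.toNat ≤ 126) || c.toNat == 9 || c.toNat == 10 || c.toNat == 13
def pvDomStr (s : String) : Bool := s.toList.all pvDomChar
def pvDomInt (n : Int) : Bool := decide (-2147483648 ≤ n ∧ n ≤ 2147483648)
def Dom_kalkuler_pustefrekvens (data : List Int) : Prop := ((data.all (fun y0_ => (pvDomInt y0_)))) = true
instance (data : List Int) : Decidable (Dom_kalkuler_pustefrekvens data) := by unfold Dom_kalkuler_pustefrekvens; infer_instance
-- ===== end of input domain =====

-- B replaces A's stateful streak machine by a stateless sliding-window count of 6-sign patterns (alternative decomposition, same cost).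


-- ===== PORT A =====
-- state: (count, current_sign, streak, ready_for_switch)
def kalkStepA (st : Int × Option Int × Int × Bool) (value : Int) : Int × Option Int × Int × Bool :=
  if value = 0 then st
  else
    let sign : Int := if value > 0 then 1 else -1
    let (count, current_sign, streak, _ready) := st
    if some sign = current_sign then
      (count, some sign, streak + 1, _ready)
    else
      let ready' := decide (streak ≥ 5)
      if ready' = true ∧ some sign ≠ current_sign then
        (count + 1, some sign, 1, false)
      else
        (count, some sign, 1, ready')

def kalkuler_pustefrekvens (data : List Int) : Int :=
  (data.foldl kalkStepA (0, none, 0, false)).1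

-- ===== PORT B =====
-- the comprehension condition a == b == c == d == e != f on a window ((((a,b),c),d),e),f)
def pvWinP (w : ((((Int × Int) × Int) × Int) × Int) × Int) : Bool :=
  decide (w.1.1.1.1.1 = w.1.1.1.1.2 ∧ w.1.1.1.1.2 = w.1.1.1.2 ∧ w.1.1.1.2 = w.1.1.2 ∧
          w.1.1.2 = w.1.2 ∧ w.1.2 ≠ w.2)

-- zip(s, s[1:], s[2:], s[3:], s[4:], s[5:]); a slice s[k:] with k ≥ 0 is List.drop k (exact)
def pvWindows (s : List Int) : List (((((Int × Int) × Int) × Int) × Int) × Int) :=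
  (((((s.zip (s.drop 1)).zip (s.drop 2)).zip (s.drop 3)).zip (s.drop 4)).zip (s.drop 5))

def kalkuler_pustefrekvens_alt (data : List Int) : Int :=
  let s := (data.filter (fun v => v ≠ 0)).map (fun v => if v > 0 then (1 : Int) else -1)
  (((pvWindows s).countP pvWinP : Nat) : Int)

-- ===== PRECONDITION & SPEC =====
def Spec_kalkuler_pustefrekvens (data : List Int) (out : Int) : Prop := out = kalkuler_pustefrekvens_alt data
instance (data : List Int) (out : Int) : Decidable (Spec_kalkuler_pustefrekvens data out) := by unfold Spec_kalkuler_pustefrekvens; infer_instance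

-- ===== CLAIM (what is proved, stated in full; the proofs are below) =====
def Claim_equal_kalkuler_pustefrekvens : Prop := ∀ (data : List Int), Dom_kalkuler_pustefrekvens data → Spec_kalkuler_pustefrekvens data (kalkuler_pustefrekvens data)

-- ===== LEMMAS AND PROOFS =====

-- A's step restricted to the filtered sign list
def kalkStepS (st : Int × Option Int × Int × Bool) (s : Int) : Int × Option Int × Int × Bool :=
  let (count, current_sign, streak, _ready) := st
  if some s = current_sign then
    (count, some s, streak + 1, _ready)
  else
    let ready' := decide (streak ≥ 5)
    if ready' = true ∧ some s ≠ current_sign then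
      (count + 1, some s, 1, false)
    else
      (count, some s, 1, ready')

theorem foldA_eq_foldS (data : List Int) (st : Int × Option Int × Int × Bool) :
    data.foldl kalkStepA st =
    ((data.filter (fun v => v ≠ 0)).map (fun v => if v > 0 then (1 : Int) else -1)).foldl kalkStepS st := by
  induction data generalizing st with
  | nil => rfl
  | cons x xs ih =>
    by_cases hx : x = 0
    · simp [hx, List.filter, kalkStepA, ih]
    · simp only [List.foldl, List.filter]
      rw [ih]
      simp [hx, kalkStepA, kalkStepS]

-- count contributed by the rest of the sign list, given current run (sign a, length k)
def kalkCount (a : Int) (k : Int) : List Int → Int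
  | [] => 0
  | x :: xs => if x = a then kalkCount a (k + 1) xs else (if k ≥ 5 then 1 else 0) + kalkCount x 1 xs

theorem foldS_count (l : List Int) (c a k : Int) (r : Bool) :
    (l.foldl kalkStepS (c, some a, k, r)).1 = c + kalkCount a k l := by
  induction l generalizing c a k r with
  | nil => simp [kalkCount]
  | cons x xs ih =>
    by_cases hx : x = a
    · simp [List.foldl, kalkStepS, hx, kalkCount, ih]
    · by_cases h5 : k ≥ 5 <;>
        simp [List.foldl, kalkStepS, hx, kalkCount, h5, ih]; ring

-- indicator of the window starting at the head of the list
def kalkHead : List Int → Int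
  | a :: b :: c :: d :: e :: f :: _ =>
    if a = b ∧ b = c ∧ c = d ∧ d = e ∧ e ≠ f then (1 : Int) else 0
  | _ => 0

-- total number of 6-windows whose first five entries are equal and differ from the sixth
def Bwin : List Int → Int
  | [] => 0
  | a :: rest => kalkHead (a :: rest) + Bwin rest

theorem Bwin_cons (y : Int) (l : List Int) : Bwin (y :: l) = kalkHead (y :: l) + Bwin l := rfl

theorem kalkCount_min (l : List Int) (a k : Int) :
    kalkCount a k l = kalkCount a (min k 5) l := by
  induction l generalizing k with
  | nil => simp [kalkCount]
  | cons x xs ih =>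
    simp only [kalkCount]
    by_cases hx : x = a
    · simp only [if_pos hx]
      rw [ih (k + 1), ih (min k 5 + 1)]
      have h : min (k + 1) 5 = min (min k 5 + 1) 5 := by omega
      rw [h]
    · simp only [if_neg hx]
      by_cases h5 : k ≥ 5
      · rw [if_pos h5, if_pos (by omega : min k 5 ≥ (5 : Int))]
      · rw [if_neg h5, if_neg (by omega : ¬ min k 5 ≥ (5 : Int))]

theorem kalkHead_zero (a x : Int) (hax : a ≠ x) (xs : List Int) (m : Nat)
    (h1 : 1 ≤ m) (h4 : m ≤ 4) : kalkHead (List.replicate m a ++ x :: xs) = 0 := by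
  interval_cases m
  · rcases xs with _ | ⟨c, _ | ⟨d, _ | ⟨e, _ | ⟨f, r⟩⟩⟩⟩ <;> simp [List.replicate, kalkHead, hax]
  · rcases xs with _ | ⟨d, _ | ⟨e, _ | ⟨f, r⟩⟩⟩ <;> simp [List.replicate, kalkHead, hax]
  · rcases xs with _ | ⟨e, _ | ⟨f, r⟩⟩ <;> simp [List.replicate, kalkHead, hax]
  · rcases xs with _ | ⟨f, r⟩ <;> simp [List.replicate, kalkHead, hax]

theorem Bwin_skip (a x : Int) (hax : a ≠ x) (xs : List Int) :
    ∀ m : Nat, m ≤ 4 → Bwin (List.replicate m a ++ x :: xs) = Bwin (x :: xs) := by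
  intro m
  induction m with
  | zero => intro _; simp
  | succ n ihn =>
    intro h
    have hdec : List.replicate (n + 1) a ++ x :: xs = a :: (List.replicate n a ++ x :: xs) := by
      simp [List.replicate]
    rw [hdec, Bwin_cons, ← hdec,
      kalkHead_zero a x hax xs (n + 1) (by omega) (by omega), ihn (by omega)]
    ring

theorem kalkCount_Bwin (l : List Int) (a : Int) (m : Nat) (h1 : 1 ≤ m) (h5 : m ≤ 5) :
    kalkCount a (m : Int) l = Bwin (List.replicate m a ++ l) := by
  induction l generalizing a m with
  | nil =>
    have hz : Bwin (List.replicate m a) = 0 := by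
      interval_cases m <;> simp [List.replicate, Bwin, kalkHead]
    simp [kalkCount, hz]
  | cons x xs ih =>
    by_cases hx : x = a
    · subst hx
      have step : kalkCount x (m : Int) (x :: xs) = kalkCount x ((m : Int) + 1) xs := by
        simp [kalkCount]
      rw [step, kalkCount_min]
      have hcast : min ((m : Int) + 1) 5 = ((min (m + 1) 5 : Nat) : Int) := by
        push_cast; omega
      rw [hcast, ih x (min (m + 1) 5) (by omega) (by omega)]
      have hrepl : List.replicate m x ++ x :: xs = List.replicate (m + 1) x ++ xs := by
        simp [List.replicate_succ']
      rw [hrepl]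
      by_cases hm4 : m ≤ 4
      · have : min (m + 1) 5 = m + 1 := by omega
        rw [this]
      · have hm5 : m = 5 := by omega
        subst hm5
        have hmin : min (5 + 1) 5 = 5 := by omega
        rw [hmin]
        have hdec : List.replicate (5 + 1) x ++ xs = x :: (List.replicate 5 x ++ xs) := by
          simp [List.replicate]
        rw [hdec, Bwin_cons]
        have hhead : kalkHead (x :: (List.replicate 5 x ++ xs)) = 0 := by
          simp [List.replicate, kalkHead]
        rw [hhead]
        ring
    · have hax : a ≠ x := fun h => hx h.symm
      have step : kalkCount a (m : Int) (x :: xs) =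
          (if (m : Int) ≥ 5 then 1 else 0) + kalkCount x 1 xs := by
        simp [kalkCount, hx]
      rw [step]
      have hx1 : kalkCount x (1 : Int) xs = Bwin (x :: xs) := by
        have := ih x 1 (by omega) (by omega)
        simpa using this
      rw [hx1]
      by_cases hm4 : m ≤ 4
      · rw [Bwin_skip a x hax xs m hm4]
        have hlt : ¬ ((m : Int) ≥ 5) := by omega
        simp [hlt]
      · have hm5 : m = 5 := by omega
        subst hm5
        have hdec : List.replicate 5 a ++ x :: xs = a :: (List.replicate 4 a ++ x :: xs) := by
          simp [List.replicate]
        have hhead : kalkHead (a :: (List.replicate 4 a ++ x :: xs)) = 1 := by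
          simp [List.replicate, kalkHead, hax]
        have hB : Bwin (List.replicate 5 a ++ x :: xs) = 1 + Bwin (x :: xs) := by
          rw [hdec, Bwin_cons, Bwin_skip a x hax xs 4 (by omega), hhead]
        rw [hB]
        norm_num

theorem pvWindows_cons (a b c d e f : Int) (r : List Int) :
    pvWindows (a :: b :: c :: d :: e :: f :: r) =
      (((((a, b), c), d), e), f) :: pvWindows (b :: c :: d :: e :: f :: r) := by
  simp [pvWindows]

theorem zip_count (s : List Int) :
    (((pvWindows s).countP pvWinP : Nat) : Int) = Bwin s := by
  induction s with
  | nil => simp [pvWindows, Bwin]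
  | cons a rest ih =>
    rcases rest with _ | ⟨b, _ | ⟨c, _ | ⟨d, _ | ⟨e, _ | ⟨f, r⟩⟩⟩⟩⟩
    · simp [pvWindows, Bwin, kalkHead]
    · simp [pvWindows, Bwin, kalkHead]
    · simp [pvWindows, Bwin, kalkHead]
    · simp [pvWindows, Bwin, kalkHead]
    · simp [pvWindows, Bwin, kalkHead]
    · rw [pvWindows_cons, List.countP_cons, Bwin_cons, ← ih]
      push_cast
      by_cases h : a = b ∧ b = c ∧ c = d ∧ d = e ∧ e ≠ f
      · simp [pvWinP, kalkHead, h]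
        omega
      · have hp : pvWinP ((((((a, b), c), d), e), f)) = false := by
          simp only [pvWinP, decide_eq_false_iff_not]
          exact h
        have hk : kalkHead (a :: b :: c :: d :: e :: f :: r) = 0 := by
          simp only [kalkHead, if_neg h]
        rw [hp, hk]
        simp

theorem kalk_main (data : List Int) :
    kalkuler_pustefrekvens data = kalkuler_pustefrekvens_alt data := by
  unfold kalkuler_pustefrekvens kalkuler_pustefrekvens_alt
  rw [foldA_eq_foldS, zip_count]
  rcases hs : (data.filter (fun v => v ≠ 0)).map (fun v => if v > 0 then (1 : Int) else -1) with _ | ⟨x, xs⟩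
  · simp [Bwin]
  · have h1 : ((x :: xs).foldl kalkStepS ((0 : Int), none, (0 : Int), false)) =
        (xs.foldl kalkStepS ((0 : Int), some x, (1 : Int), false)) := by
      simp [List.foldl, kalkStepS]
    rw [h1, foldS_count]
    have := kalkCount_Bwin xs x 1 (by omega) (by omega)
    simpa using this

-- ===== VERDICT (by name: the statement is the Claim_ definition above) =====
theorem kalkuler_pustefrekvens_spec : Claim_equal_kalkuler_pustefrekvens := by
  intro data _
  unfold Spec_kalkuler_pustefrekvens
  exact kalk_main data
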